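-- pv_equiv track=rewrite | github.com/jeffreymutethia/Seattle-Pulse | backend/app/api/content.py | avoid_consecutive_sources
-- ===== SOURCE A (Python) =====
-- def _get_item_user_id(item):
--     """Helper to extract user_id from a dict or object."""
--     if isinstance(item, dict):
--         if "user_id" in item:
--             return item.get("user_id")
--         if "user" in item and isinstance(item["user"], dict):
--             return item["user"].get("id")
--     return getattr(item, "user_id", None)
--
-- def avoid_consecutive_sources(items):
--     """Reorder items so consecutive entries from the same user are avoided."""
--     result = list(items)
--     for i in range(1, len(result)):
--         prev_id = _get_item_user_id(result[i - 1])
--         curr_id = _get_item_user_id(result[i])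
--         if prev_id is not None and curr_id == prev_id:
--             swap_idx = None
--             for j in range(i + 1, len(result)):
--                 if _get_item_user_id(result[j]) != prev_id:
--                     swap_idx = j
--                     break
--             if swap_idx is not None:
--                 result[i], result[swap_idx] = result[swap_idx], result[i]
--     return result
-- ===== SOURCE B (Python) =====
-- def _user_id(item):
--     """Extract user_id from an item dict (dict[str, int]): the direct key or None."""
--     return item.get("user_id")
--
-- def avoid_consecutive_sources(items):
--     """Reorder items so consecutive entries from the same user are avoided.
--
--     Builds the output front to back: ids are computed once per item; the
--     remaining input is kept as a stack (reversed, top = next item); when the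
--     next item repeats the previous user, the nearest later item with a
--     different id is rotated to the front of the stack.
--     """
--     stack = [(_user_id(x), x) for x in reversed(items)]
--     out = []
--     prev_id = None
--     while stack:
--         hid, h = stack.pop()
--         if prev_id is not None and hid == prev_id:
--             # scan the stack from its top (= earliest remaining item) downwards
--             for j in range(len(stack) - 1, -1, -1):
--                 if stack[j][0] != prev_id:
--                     hid2, h2 = stack[j]
--                     stack[j] = (hid, h)
--                     hid, h = hid2, h2
--                     break
--         out.append(h)
--         prev_id = hid
--     return out
-- ===== Notes on version B (the rewrite author's own statement) =====
-- stated objective: alternative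
-- what changed: B replaces A's in-place index loop with repeated pyGetD/swap and per-comparison re-extraction of user ids by a one-pass front-to-back rebuild: ids are computed once into tagged pairs, the pending items are kept as a stack, and a first-match rotation brings the nearest different-id item forward.
import Mathlib
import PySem

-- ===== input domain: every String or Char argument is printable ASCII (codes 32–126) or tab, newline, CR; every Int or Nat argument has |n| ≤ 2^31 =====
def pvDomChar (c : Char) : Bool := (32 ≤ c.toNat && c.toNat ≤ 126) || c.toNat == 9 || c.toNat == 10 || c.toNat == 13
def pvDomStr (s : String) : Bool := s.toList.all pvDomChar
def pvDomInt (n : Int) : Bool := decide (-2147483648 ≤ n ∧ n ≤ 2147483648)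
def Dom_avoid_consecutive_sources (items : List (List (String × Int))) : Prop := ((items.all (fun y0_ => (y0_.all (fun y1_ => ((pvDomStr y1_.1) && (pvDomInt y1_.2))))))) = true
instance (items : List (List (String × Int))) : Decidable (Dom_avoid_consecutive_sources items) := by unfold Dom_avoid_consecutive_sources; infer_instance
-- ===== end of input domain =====

-- B rebuilds the output front-to-back by structural recursion on a tagged stack (ids computed once),
-- instead of A's index loop with in-place swaps; objective: alternative decomposition, same asymptotic cost.


-- ===== PORT A =====
-- _get_item_user_id: the item is a dict[str,int] (association list, first match wins), so the
-- "user"-is-a-dict branch can never fire (values are ints) and getattr on a dict yields None.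
def getItemUserId (item : List (String × Int)) : Option Int :=
  if (item.find? (fun p => p.1 == "user_id")).isSome then
    (item.find? (fun p => p.1 == "user_id")).map (·.2)
  else none

def aStep (result : List (List (String × Int))) (i : Int) : List (List (String × Int)) :=
  let prev_id := getItemUserId (PySem.List.pyGetD result (i - 1) [])
  let curr_id := getItemUserId (PySem.List.pyGetD result i [])
  if prev_id.isSome && curr_id == prev_id then
    -- for j in range(i+1, len(result)): first j with a different id (break)
    match (PySem.List.pyRange (i + 1) (result.length : Int) 1).find?
        (fun j => getItemUserId (PySem.List.pyGetD result j []) != prev_id) with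
    | some j =>
        let xi := PySem.List.pyGetD result i []
        let xj := PySem.List.pyGetD result j []
        PySem.List.pySetD (PySem.List.pySetD result i xj) j xi
    | none => result
  else result

def avoid_consecutive_sources (items : List (List (String × Int))) : List (List (String × Int)) :=
  (PySem.List.pyRange 1 (items.length : Int) 1).foldl aStep items

-- ===== PORT B =====
-- _user_id of Source B (same extraction rules as A's helper, under the same dict typing)
def uidB (item : List (String × Int)) : Option Int :=
  if (item.find? (fun p => p.1 == "user_id")).isSome then
    (item.find? (fun p => p.1 == "user_id")).map (·.2)
  else none

-- the inner for-loop of Source B: scan the stack top-down for the first entry with id ≠ pid and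
-- exchange it with the popped pair h; returns (front pair, new stack).  Source B keeps the stack
-- reversed (top = last); here the same stack is head-first, so the top-down index scan is
-- exactly this first-match recursion.
def altSwap (pid : Option Int) (h : Option Int × List (String × Int)) :
    List (Option Int × List (String × Int)) →
    (Option Int × List (String × Int)) × List (Option Int × List (String × Int))
  | [] => (h, [])
  | c :: cs =>
      if c.1 != pid then (c, h :: cs)
      else
        let r := altSwap pid h cs
        (r.1, c :: r.2)

theorem altSwap_len (pid : Option Int) (h : Option Int × List (String × Int))
    (t : List (Option Int × List (String × Int))) : (altSwap pid h t).2.length = t.length := by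
  induction t with
  | nil => rfl
  | cons c cs ih => by_cases hc : c.1 != pid <;> simp [altSwap, hc, ih]

-- the while-loop of Source B: pop the next pair, rotate in a different-id pair if needed, emit.
def altGo (pid : Option Int) (rest : List (Option Int × List (String × Int))) :
    List (List (String × Int)) :=
  match rest with
  | [] => []
  | h :: t =>
      if pid.isSome && h.1 == pid then
        let s := altSwap pid h t
        s.1.2 :: altGo s.1.1 s.2
      else
        h.2 :: altGo h.1 t
termination_by rest.length
decreasing_by
  · simp [altSwap_len]
  · simp

def avoid_consecutive_sources_alt (items : List (List (String × Int))) : List (List (String × Int)) :=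
  altGo none (items.map (fun x => (uidB x, x)))

-- ===== PRECONDITION & SPEC =====
def Spec_avoid_consecutive_sources (items : List (List (String × Int))) (out : List (List (String × Int))) : Prop := out = avoid_consecutive_sources_alt items
instance (items : List (List (String × Int))) (out : List (List (String × Int))) : Decidable (Spec_avoid_consecutive_sources items out) := by unfold Spec_avoid_consecutive_sources; infer_instance

-- ===== CLAIM (what is proved, stated in full; the proofs are below) =====
def Claim_equal_avoid_consecutive_sources : Prop := ∀ (items : List (List (String × Int))), Dom_avoid_consecutive_sources items → Spec_avoid_consecutive_sources items (avoid_consecutive_sources items)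


-- ===== LEMMAS AND PROOFS =====

-- indexing an append past the prefix
theorem pyGetD_app (pre t : List (List (String × Int))) (k : Nat) :
    PySem.List.pyGetD (pre ++ t) ((pre.length : Int) + (k : Int)) [] = t.getD k [] := by
  rw [show (pre.length : Int) + (k : Int) = ((pre.length + k : Nat) : Int) by push_cast; ring,
    PySem.List.pyGetD_natCast]
  simp [List.getD, List.getElem?_append_right (Nat.le_add_right _ _)]

-- setting an append past the prefix
theorem pySetD_app (pre t : List (List (String × Int))) (k : Nat) (v : List (String × Int)) :
    PySem.List.pySetD (pre ++ t) ((pre.length : Int) + (k : Int)) v = pre ++ t.set k v := by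
  rw [show (pre.length : Int) + (k : Int) = ((pre.length + k : Nat) : Int) by push_cast; ring,
    PySem.List.pySetD_natCast, List.set_append_right] <;> simp

-- A's inner break-search over indices is findIdx? over the suffix being scanned
theorem find_range (p : List (String × Int) → Bool) :
    ∀ (t pre : List (List (String × Int))),
    (PySem.List.pyRange (pre.length : Int) ((pre.length : Int) + (t.length : Int)) 1).find?
        (fun j => p (PySem.List.pyGetD (pre ++ t) j []))
      = (t.findIdx? p).map (fun k => (pre.length : Int) + (k : Int)) := by
  intro t
  induction t with
  | nil => intro pre; simp [PySem.List.pyRange_one_eq_nil]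
  | cons c cs ih =>
    intro pre
    rw [PySem.List.pyRange_one_cons (by push_cast [List.length_cons]; omega), List.find?_cons,
      List.findIdx?_cons]
    have hc : PySem.List.pyGetD (pre ++ c :: cs) ((pre.length : Int)) [] = c := by
      rw [show (pre.length : Int) = (pre.length : Int) + ((0 : Nat) : Int) by push_cast; ring,
        pyGetD_app]
      rfl
    cases hp : p c with
    | true => simp [hc, hp]
    | false =>
      simp only [hc, hp, Bool.false_eq_true, if_false]
      rw [show (pre.length : Int) + ((c :: cs).length : Int)
            = ((pre.length : Int) + 1) + (cs.length : Int) by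
        push_cast [List.length_cons]; ring]
      rw [show pre ++ c :: cs = (pre ++ [c]) ++ cs by simp]
      rw [show (pre.length : Int) + 1 = (((pre ++ [c]).length : Nat) : Int) by
        push_cast [List.length_append, List.length_cons, List.length_nil]; ring]
      rw [ih (pre ++ [c])]
      cases cs.findIdx? p with
      | none => simp
      | some k =>
        simp
        omega

-- B's stack rotation, characterised by findIdx? on the untagged suffix: nothing to rotate
theorem altSwap_none (pid : Option Int) (h : List (String × Int)) :
    ∀ (t : List (List (String × Int))),
    t.findIdx? (fun y => getItemUserId y != pid) = none →
    altSwap pid (getItemUserId h, h) (t.map (fun y => (getItemUserId y, y)))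
      = ((getItemUserId h, h), t.map (fun y => (getItemUserId y, y))) := by
  intro t
  induction t with
  | nil => intro _; rfl
  | cons c cs ih =>
    intro hf
    rw [List.findIdx?_cons] at hf
    cases hp : (getItemUserId c != pid) with
    | true => simp [hp] at hf
    | false =>
      simp only [hp, Bool.false_eq_true, if_false, Option.map_eq_none_iff] at hf
      simp [altSwap, hp, ih hf]

-- B's stack rotation when a different-id entry exists at untagged position k
theorem altSwap_some (pid : Option Int) (h : List (String × Int)) :
    ∀ (t : List (List (String × Int))) (k : Nat),
    t.findIdx? (fun y => getItemUserId y != pid) = some k →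
    altSwap pid (getItemUserId h, h) (t.map (fun y => (getItemUserId y, y)))
      = ((getItemUserId (t.getD k []), t.getD k []),
         (t.set k h).map (fun y => (getItemUserId y, y))) := by
  intro t
  induction t with
  | nil => intro k hk; simp at hk
  | cons c cs ih =>
    intro k hk
    rw [List.findIdx?_cons] at hk
    cases hp : (getItemUserId c != pid) with
    | true =>
      simp only [hp, if_true] at hk
      cases hk
      simp [altSwap, hp]
    | false =>
      simp only [hp, Bool.false_eq_true, if_false] at hk
      cases hko : cs.findIdx? (fun y => getItemUserId y != pid) with
      | none => rw [hko] at hk; simp at hk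
      | some k0 =>
        rw [hko] at hk
        simp only [Option.map_some, Option.some.injEq] at hk
        subst hk
        simp [altSwap, hp, ih k0 hko]

-- main loop invariant: the already-fixed prefix 'done ++ [x]' never changes again, and the
-- remaining iterations of A's index loop compute exactly B's recursion on the suffix
theorem loop_eq : ∀ (n : Nat) (t : List (List (String × Int))), t.length = n →
    ∀ (done : List (List (String × Int))) (x : List (String × Int)),
    (PySem.List.pyRange ((done.length : Int) + 1) ((done.length : Int) + 1 + (t.length : Int)) 1).foldl
        aStep (done ++ x :: t)
      = done ++ x :: altGo (getItemUserId x) (t.map (fun y => (getItemUserId y, y))) := by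
  intro n
  induction n using Nat.strong_induction_on with
  | _ n IH =>
  intro t ht done x
  cases t with
  | nil =>
    simp only [List.length_nil, Nat.cast_zero, add_zero, List.map_nil]
    rw [PySem.List.pyRange_one_eq_nil le_rfl]
    simp [altGo]
  | cons h t' =>
    simp only [List.length_cons] at ht
    rw [show ((done.length : Int) + 1 + ((h :: t').length : Int))
          = (done.length : Int) + 1 + 1 + (t'.length : Int) by
      push_cast [List.length_cons]; ring]
    rw [PySem.List.pyRange_one_cons (by push_cast; omega), List.foldl_cons]
    have hprev : PySem.List.pyGetD (done ++ x :: h :: t') ((done.length : Int) + 1 - 1) [] = x := by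
      rw [show (done.length : Int) + 1 - 1 = (done.length : Int) + ((0 : Nat) : Int) by push_cast; ring,
        pyGetD_app]
      rfl
    have hcurr : PySem.List.pyGetD (done ++ x :: h :: t') ((done.length : Int) + 1) [] = h := by
      rw [show (done.length : Int) + 1 = (done.length : Int) + ((1 : Nat) : Int) by push_cast; ring,
        pyGetD_app]
      rfl
    have IH' : ∀ (t2 : List (List (String × Int))) (x2 : List (String × Int)), t2.length = t'.length →
        (PySem.List.pyRange ((done.length : Int) + 1 + 1) ((done.length : Int) + 1 + 1 + (t'.length : Int)) 1).foldl
            aStep ((done ++ [x]) ++ x2 :: t2)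
          = (done ++ [x]) ++ x2 :: altGo (getItemUserId x2) (t2.map (fun y => (getItemUserId y, y))) := by
      intro t2 x2 h2
      have h3 := IH t2.length (by omega) t2 rfl (done ++ [x]) x2
      rw [show (done.length : Int) + 1 + 1 = (((done ++ [x]).length : Nat) : Int) + 1 by
        push_cast [List.length_append, List.length_cons, List.length_nil]; ring,
        show (t'.length : Int) = (t2.length : Int) by rw [h2]]
      exact h3
    by_cases hC : ((getItemUserId x).isSome && (getItemUserId h == getItemUserId x)) = true
    · have hfind : (PySem.List.pyRange ((done.length : Int) + 1 + 1) (((done ++ x :: h :: t').length : Nat) : Int) 1).find?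
            (fun j => getItemUserId (PySem.List.pyGetD (done ++ x :: h :: t') j []) != getItemUserId x)
          = (t'.findIdx? (fun y => getItemUserId y != getItemUserId x)).map
              (fun k => (((done ++ [x, h]).length : Nat) : Int) + (k : Int)) := by
        rw [show done ++ x :: h :: t' = (done ++ [x, h]) ++ t' by simp]
        rw [show (done.length : Int) + 1 + 1 = (((done ++ [x, h]).length : Nat) : Int) by
          push_cast [List.length_append, List.length_cons, List.length_nil]; ring]
        rw [show ((((done ++ [x, h]) ++ t').length : Nat) : Int)
              = (((done ++ [x, h]).length : Nat) : Int) + (t'.length : Int) by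
          push_cast [List.length_append]; ring]
        exact find_range (fun y => getItemUserId y != getItemUserId x) t' (done ++ [x, h])
      cases hfi : t'.findIdx? (fun y => getItemUserId y != getItemUserId x) with
      | none =>
        have hstep : aStep (done ++ x :: h :: t') ((done.length : Int) + 1) = done ++ x :: h :: t' := by
          simp only [aStep, hprev, hcurr]
          rw [if_pos hC, hfind, hfi]
          simp
        rw [hstep, show done ++ x :: h :: t' = (done ++ [x]) ++ h :: t' by simp, IH' t' h rfl]
        have hs := altSwap_none (getItemUserId x) h t' hfi
        simp [altGo, hC, hs]
      | some k =>
        have hxj : PySem.List.pyGetD (done ++ x :: h :: t')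
              ((((done ++ [x, h]).length : Nat) : Int) + (k : Int)) [] = t'.getD k [] := by
          rw [show done ++ x :: h :: t' = (done ++ [x, h]) ++ t' by simp, pyGetD_app]
        have hfind2 : (PySem.List.pyRange ((done.length : Int) + 1 + 1) (((done ++ x :: h :: t').length : Nat) : Int) 1).find?
              (fun j => getItemUserId (PySem.List.pyGetD (done ++ x :: h :: t') j []) != getItemUserId x)
            = some ((((done ++ [x, h]).length : Nat) : Int) + (k : Int)) := by
          rw [hfind, hfi]; rfl
        have hstep : aStep (done ++ x :: h :: t') ((done.length : Int) + 1)
            = done ++ x :: (t'.getD k []) :: t'.set k h := by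
          simp only [aStep, hprev, hcurr]
          rw [if_pos hC, hfind2]
          change PySem.List.pySetD (PySem.List.pySetD (done ++ x :: h :: t') ((done.length : Int) + 1)
              (PySem.List.pyGetD (done ++ x :: h :: t') ((((done ++ [x, h]).length : Nat) : Int) + (k : Int)) []))
            ((((done ++ [x, h]).length : Nat) : Int) + (k : Int))
            h = done ++ x :: (t'.getD k []) :: t'.set k h
          rw [hxj]
          rw [show done ++ x :: h :: t' = (done ++ [x]) ++ h :: t' by simp]
          rw [show (done.length : Int) + 1 = (((done ++ [x]).length : Nat) : Int) + ((0 : Nat) : Int) by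
            push_cast [List.length_append, List.length_cons, List.length_nil]; ring]
          rw [pySetD_app]
          simp only [List.set_cons_zero]
          rw [show (done ++ [x]) ++ t'.getD k [] :: t' = (done ++ [x, t'.getD k []]) ++ t' by simp]
          rw [show (((done ++ [x, h]).length : Nat) : Int) + (k : Int)
                = (((done ++ [x, t'.getD k []]).length : Nat) : Int) + (k : Int) by
            push_cast [List.length_append, List.length_cons, List.length_nil]; ring]
          rw [pySetD_app]
          simp
        rw [hstep,
          show done ++ x :: t'.getD k [] :: t'.set k h = (done ++ [x]) ++ t'.getD k [] :: t'.set k h by simp,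
          IH' (t'.set k h) (t'.getD k []) (by simp)]
        have hs := altSwap_some (getItemUserId x) h t' k hfi
        simp [altGo, hC, hs]
    · have hstep : aStep (done ++ x :: h :: t') ((done.length : Int) + 1) = done ++ x :: h :: t' := by
        simp only [aStep, hprev, hcurr]
        rw [if_neg hC]
      rw [hstep, show done ++ x :: h :: t' = (done ++ [x]) ++ h :: t' by simp, IH' t' h rfl]
      simp [altGo, hC]

-- ===== VERDICT (by name: the statement is the Claim_ definition above) =====
theorem avoid_consecutive_sources_spec : Claim_equal_avoid_consecutive_sources := by
  intro items _
  unfold Spec_avoid_consecutive_sources avoid_consecutive_sources avoid_consecutive_sources_alt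
  cases items with
  | nil => simp [PySem.List.pyRange_one_eq_nil, altGo]
  | cons x t =>
      have h := loop_eq t.length t rfl [] x
      simp only [List.nil_append, List.length_nil, Nat.cast_zero, zero_add] at h
      have harr : ((x :: t).length : Int) = 1 + (t.length : Int) := by
        simp [List.length_cons]; ring
      rw [harr, h]
      simp [altGo, uidB, getItemUserId]
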